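-- pv_equiv track=rewrite | github.com/miliar/Code_Jam_Webscraper | solutions_python/Problem_181/2090.py | win_last_word
-- ===== SOURCE A (Python) =====
-- def combine(current_word, letter):
--     result = []
--     for word in current_word:
--         result.append(word+letter)
--         result.append(letter+word)
--     return result
--
-- def win_last_word(word):
--     if len(word) == 1:
--         return [word]
--     whiteboard = []
--     current = [word[0]]
--     for i in range(1,len(word)):
--         next_word_list = combine(current,word[i])
--         for each in next_word_list:
--             whiteboard.append(each)
--         current = next_word_list
--     whiteboard.sort(reverse=True)
--     whiteboard.sort(key=len, reverse=True)
--     #whiteboard.sort(key=lambda item: (-len(item), item))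
--     return whiteboard
-- ===== SOURCE B (Python) =====
-- def win_last_word(word):
--     # Rebuild every result word independently from its front/back choice
--     # vector, per target length; one tuple-key sort replaces A's two sorts.
--     if len(word) == 1:
--         return [word]
--     out = []
--     tail = word[1:]
--     for L in range(2, len(word) + 1):
--         choices = [[]]
--         for _ in range(L - 1):
--             choices = [c + [b] for c in choices for b in (0, 1)]
--         for c in choices:
--             front = []
--             back = []
--             for b, letter in zip(c, tail):
--                 if b == 0:
--                     back.append(letter)
--                 else:
--                     front.append(letter)
--             front.reverse()
--             out.append(''.join(front) + word[0] + ''.join(back))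
--     return sorted(out, key=lambda t: (len(t), t), reverse=True)
-- ===== Notes on version B (the rewrite author's own statement) =====
-- stated objective: alternative
-- what changed: Instead of A's level-by-level doubling of a running list of strings (combine) followed by two stable sorts, B enumerates, for each target length L, all front/back choice vectors and rebuilds each result word independently from scratch, then orders everything with a single tuple-key sort (len desc, lex desc).
import Mathlib
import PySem

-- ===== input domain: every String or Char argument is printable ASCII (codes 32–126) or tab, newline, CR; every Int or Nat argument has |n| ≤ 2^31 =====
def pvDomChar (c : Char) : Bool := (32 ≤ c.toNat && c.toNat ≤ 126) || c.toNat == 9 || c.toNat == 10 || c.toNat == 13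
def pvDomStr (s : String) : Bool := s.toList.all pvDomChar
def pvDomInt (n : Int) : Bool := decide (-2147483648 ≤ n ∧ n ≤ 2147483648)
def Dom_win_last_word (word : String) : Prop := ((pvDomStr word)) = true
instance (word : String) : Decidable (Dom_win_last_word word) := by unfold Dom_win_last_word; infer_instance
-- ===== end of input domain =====

-- B enumerates all front/back choice vectors per target length and rebuilds each
-- result word independently, with one tuple-key sort instead of A's two stable
-- sorts; same return value as A on every non-empty word (objective: alternative).

-- word[i]: PySem.Str.pyGet? returns none only on an out-of-range index; every use
-- below has 0 ≤ i < len word (word ≠ "" by Pre_), so the getD default is unreachable.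
def pvChr (word : String) (i : Int) : String :=
  String.ofList [(PySem.Str.pyGet? word i).getD ' ']

-- ===== PORT A =====
def combine (current_word : List String) (letter : String) : List String :=
  current_word.foldl (fun result w => (result ++ [w ++ letter]) ++ [letter ++ w]) []

def win_last_word (word : String) : List String :=
  if PySem.Str.len word = 1 then [word]
  else
    let st := (PySem.List.pyRange 1 (PySem.Str.len word)).foldl
      (fun (st : List String × List String) i =>
        let next_word_list := combine st.2 (pvChr word i)
        (next_word_list.foldl (fun wb each => wb ++ [each]) st.1, next_word_list))
      ([], [pvChr word 0])
    PySem.List.sorted (PySem.List.sorted st.1 (fun x => x) true) (fun x => PySem.Str.len x) true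

-- ===== PORT B =====
def win_last_word_alt (word : String) : List String :=
  if PySem.Str.len word = 1 then [word]
  else
    let tail := PySem.Str.slice word (some 1) none
    let out := (PySem.List.pyRange 2 (PySem.Str.len word + 1)).foldl
      (fun out L =>
        let choices := (PySem.List.pyRange 0 (L - 1)).foldl
          (fun (cs : List (List Int)) _ => cs.flatMap (fun c => [c ++ [(0 : Int)], c ++ [(1 : Int)]]))
          [[]]
        choices.foldl
          (fun out c =>
            -- front/back letter lists; ''.join over 1-char strings is exact as String.ofList
            let fb := (c.zip tail.toList).foldl
              (fun (fb : List Char × List Char) bl =>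
                if bl.1 = 0 then (fb.1, fb.2 ++ [bl.2]) else (fb.1 ++ [bl.2], fb.2))
              ([], [])
            out ++ [String.ofList fb.1.reverse ++ pvChr word 0 ++ String.ofList fb.2])
          out)
      []
    PySem.List.sorted2 out (fun t => PySem.Str.len t) (fun t => t) true

-- ===== PRECONDITION & SPEC =====
-- Pre_ excludes only the empty string, on which A raises IndexError at word[0].
def Pre_win_last_word (word : String) : Prop := word ≠ ""
instance (word : String) : Decidable (Pre_win_last_word word) := by unfold Pre_win_last_word; infer_instance
def pvWitness_win_last_word : String := "ab"

def Spec_win_last_word (word : String) (out : List String) : Prop := out = win_last_word_alt word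
instance (word : String) (out : List String) : Decidable (Spec_win_last_word word out) := by unfold Spec_win_last_word; infer_instance

-- ===== CLAIM (what is proved, stated in full; the proofs are below) =====
def Claim_equal_win_last_word : Prop := ∀ (word : String), Dom_win_last_word word → Pre_win_last_word word → Spec_win_last_word word (win_last_word word)

-- ===== LEMMAS AND PROOFS =====

-- the common shape of both programs' generated word list: pvDbl doubles a level,
-- pvLvl is the level reached after a letter prefix, pvWAux the whiteboard after k letters
def pvDbl (l : Char) (ws : List String) : List String :=
  ws.flatMap (fun w => [w ++ String.ofList [l], String.ofList [l] ++ w])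

def pvLvl (s0 : String) (ls : List Char) : List String :=
  ls.foldl (fun cur l => pvDbl l cur) [s0]

def pvWAux (word : String) (k : Nat) : List String :=
  ((List.range k).map (fun j => pvLvl (pvChr word 0) ((word.toList.drop 1).take (j + 1)))).flatten

def pvChs : Nat → List (List Int)
  | 0 => [[]]
  | k + 1 => (pvChs k).flatMap (fun c => [c ++ [0], c ++ [1]])

def pvBuildF (s0 : String) (ts : List Char) (c : List Int) : String :=
  (c.zip ts).foldl (fun s bl => if bl.1 = 0 then s ++ String.ofList [bl.2] else String.ofList [bl.2] ++ s) s0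

-- order relation of the final list: length descending, ties lexicographically descending
def pvR (a b : String) : Prop :=
  PySem.Str.len b < PySem.Str.len a ∨ (PySem.Str.len a = PySem.Str.len b ∧ b ≤ a)

lemma pvInsertBy_nil {α : Type} (before : α → α → Bool) (x : α) :
    PySem.List.insertBy before x [] = [x] := by simp [PySem.List.insertBy]

lemma pvInsertBy_cons {α : Type} (before : α → α → Bool) (x y : α) (ys : List α) :
    PySem.List.insertBy before x (y :: ys) =
      if before x y then x :: y :: ys else y :: PySem.List.insertBy before x ys := by
  simp [PySem.List.insertBy]

lemma pvR_trans {a b c : String} (h1 : pvR a b) (h2 : pvR b c) : pvR a c := by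
  unfold pvR at *
  rcases h1 with h1 | ⟨h1, h1'⟩ <;> rcases h2 with h2 | ⟨h2, h2'⟩
  · exact Or.inl (h2.trans h1)
  · exact Or.inl (h2 ▸ h1)
  · exact Or.inl (h1 ▸ h2)
  · exact Or.inr ⟨h1.trans h2, h2'.trans h1'⟩

lemma pvR_antisymm {a b : String} (h1 : pvR a b) (h2 : pvR b a) : a = b := by
  unfold pvR at *
  rcases h1 with h1 | ⟨h1, h1'⟩ <;> rcases h2 with h2 | ⟨h2, h2'⟩ <;> try omega
  exact le_antisymm h2' h1'

lemma pvCond2 (x y : String) :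
    (decide (PySem.Str.len y < PySem.Str.len x) || (!decide (PySem.Str.len x < PySem.Str.len y) && decide (y < x))) = true
      ↔ (PySem.Str.len y < PySem.Str.len x ∨ (¬ (PySem.Str.len x < PySem.Str.len y) ∧ y < x)) := by
  simp only [Bool.or_eq_true, Bool.and_eq_true, Bool.not_eq_true', decide_eq_true_eq,
    decide_eq_false_iff_not]

lemma pvIns1 (x : String) (acc : List String) (hp : acc.Pairwise pvR)
    (hle : ∀ y ∈ acc, x ≤ y) :
    (PySem.List.insertBy (fun a b => decide (PySem.Str.len b < PySem.Str.len a)) x acc).Pairwise pvR := by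
  induction acc with
  | nil => rw [pvInsertBy_nil]; simp
  | cons y ys ih =>
    rw [List.pairwise_cons] at hp
    rw [pvInsertBy_cons]
    by_cases hb : PySem.Str.len y < PySem.Str.len x
    · rw [if_pos (decide_eq_true hb)]
      rw [List.pairwise_cons]
      refine ⟨?_, List.pairwise_cons.2 hp⟩
      intro z hz
      rcases List.mem_cons.1 hz with rfl | hz
      · exact Or.inl hb
      · exact pvR_trans (Or.inl hb) (hp.1 z hz)
    · rw [if_neg (by simp only [decide_eq_true_eq]; exact hb)]
      rw [List.pairwise_cons]
      constructor
      · intro z hz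
        rcases (PySem.List.mem_insertBy _ _ _ _).1 hz with rfl | hz
        · by_cases h : PySem.Str.len z < PySem.Str.len y
          · exact Or.inl h
          · exact Or.inr ⟨le_antisymm (not_lt.1 h) (not_lt.1 hb), hle y List.mem_cons_self⟩
        · exact hp.1 z hz
      · exact ih hp.2 (fun z hz => hle z (List.mem_cons_of_mem _ hz))

lemma pvFold1 (xs : List String) (acc : List String) (hp : acc.Pairwise pvR)
    (hle : ∀ y ∈ acc, ∀ x ∈ xs, x ≤ y) (hxs : xs.Pairwise (fun a b => b ≤ a)) :
    (xs.foldl (fun acc x => PySem.List.insertBy (fun a b => decide (PySem.Str.len b < PySem.Str.len a)) x acc) acc).Pairwise pvR := by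
  induction xs generalizing acc with
  | nil => simpa
  | cons x xs ih =>
    rw [List.pairwise_cons] at hxs
    refine ih _ (pvIns1 x acc hp (fun y hy => hle y hy x List.mem_cons_self)) ?_ hxs.2
    intro y hy z hz
    rcases (PySem.List.mem_insertBy _ _ _ _).1 hy with rfl | hy
    · exact hxs.1 z hz
    · exact hle y hy z (List.mem_cons_of_mem _ hz)

lemma pvIns2 (x : String) (acc : List String) (hp : acc.Pairwise pvR) :
    (PySem.List.insertBy (fun a b => decide (PySem.Str.len b < PySem.Str.len a) || (!decide (PySem.Str.len a < PySem.Str.len b) && decide (b < a))) x acc).Pairwise pvR := by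
  induction acc with
  | nil => rw [pvInsertBy_nil]; simp
  | cons y ys ih =>
    rw [List.pairwise_cons] at hp
    rw [pvInsertBy_cons]
    by_cases hb : PySem.Str.len y < PySem.Str.len x ∨ (¬ (PySem.Str.len x < PySem.Str.len y) ∧ y < x)
    · rw [if_pos ((pvCond2 x y).2 hb)]
      have hxy : pvR x y := by
        rcases hb with h | ⟨h1, h2⟩
        · exact Or.inl h
        · by_cases h3 : PySem.Str.len y < PySem.Str.len x
          · exact Or.inl h3
          · exact Or.inr ⟨le_antisymm (not_lt.1 h3) (not_lt.1 h1), le_of_lt h2⟩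
      rw [List.pairwise_cons]
      refine ⟨?_, List.pairwise_cons.2 hp⟩
      intro z hz
      rcases List.mem_cons.1 hz with rfl | hz
      · exact hxy
      · exact pvR_trans hxy (hp.1 z hz)
    · rw [if_neg (fun hc => hb ((pvCond2 x y).1 hc))]
      rw [List.pairwise_cons]
      have hb1 : ¬ PySem.Str.len y < PySem.Str.len x := fun a => hb (Or.inl a)
      have hb2 : ¬ (¬ PySem.Str.len x < PySem.Str.len y ∧ y < x) := fun b => hb (Or.inr b)
      constructor
      · intro z hz
        rcases (PySem.List.mem_insertBy _ _ _ _).1 hz with rfl | hz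
        · by_cases h : PySem.Str.len z < PySem.Str.len y
          · exact Or.inl h
          · have hlen : PySem.Str.len y = PySem.Str.len z := le_antisymm (not_lt.1 h) (not_lt.1 hb1)
            have hzy : ¬ y < z := fun hc => hb2 ⟨h, hc⟩
            exact Or.inr ⟨hlen, not_lt.1 hzy⟩
        · exact hp.1 z hz
      · exact ih hp.2

lemma pvFold2 (xs : List String) (acc : List String) (hp : acc.Pairwise pvR) :
    (xs.foldl (fun acc x => PySem.List.insertBy (fun a b => decide (PySem.Str.len b < PySem.Str.len a) || (!decide (PySem.Str.len a < PySem.Str.len b) && decide (b < a))) x acc) acc).Pairwise pvR := by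
  induction xs generalizing acc with
  | nil => simpa
  | cons x xs ih => exact ih _ (pvIns2 x acc hp)

-- A's two stable sorts and B's one tuple-key sort produce the same list
lemma pvTwoSorts (xs : List String) :
    PySem.List.sorted (PySem.List.sorted xs (fun x => x) true) (fun x => PySem.Str.len x) true
      = PySem.List.sorted2 xs (fun t => PySem.Str.len t) (fun t => t) true := by
  apply List.Perm.eq_of_pairwise (le := pvR) (fun a b _ _ h1 h2 => pvR_antisymm h1 h2)
  · rw [PySem.List.sorted_rev_eq_foldl_insertBy]
    apply pvFold1 _ _ (by simp) (by simp)
    exact PySem.List.sorted_pairwise_rev xs (fun x => x)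
  · show (PySem.List.sorted2 xs (fun t => PySem.Str.len t) (fun t => t) true).Pairwise pvR
    simp only [PySem.List.sorted2]
    apply pvFold2 _ _ (by simp)
  · exact ((PySem.List.sorted_perm _ _ _).trans (PySem.List.sorted_perm _ _ _)).trans
      (PySem.List.sorted2_perm _ _ _ _).symm

lemma pvCombine_eq (ws : List String) (c : Char) :
    combine ws (String.ofList [c]) = pvDbl c ws := by
  unfold combine pvDbl
  rw [show (fun (result : List String) w => (result ++ [w ++ String.ofList [c]]) ++ [String.ofList [c] ++ w])
      = fun (result : List String) w => result ++ ([w ++ String.ofList [c]] ++ [String.ofList [c] ++ w])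
    from funext fun r => funext fun w => List.append_assoc r _ _]
  rw [PySem.List.foldl_append_eq_flatMap (fun w => [w ++ String.ofList [c]] ++ [String.ofList [c] ++ w]) ws []]
  simp

lemma pvChs_len : ∀ (m : Nat), ∀ c ∈ pvChs m, c.length = m := by
  intro m
  induction m with
  | zero => simp [pvChs]
  | succ k ih =>
    intro c hc
    simp only [pvChs, List.mem_flatMap] at hc
    obtain ⟨a, ha, hc⟩ := hc
    simp only [List.mem_cons, List.not_mem_nil, or_false] at hc
    rcases hc with rfl | rfl <;> simp [ih a ha]

lemma pvZip_snoc {α β : Type} (c : List α) (b : α) (ts : List β) (h : c.length < ts.length) :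
    (c ++ [b]).zip ts = c.zip ts ++ [(b, ts[c.length]'(by omega))] := by
  induction c generalizing ts with
  | nil =>
    cases ts with
    | nil => simp at h
    | cons t ts' => simp
  | cons a c' ih =>
    cases ts with
    | nil => simp at h
    | cons t ts' =>
      simp only [List.cons_append, List.zip_cons_cons, List.length_cons]
      rw [ih ts' (by simpa using h)]
      simp

lemma pvLvl_snoc (s0 : String) (ls : List Char) (l : Char) :
    pvLvl s0 (ls ++ [l]) = pvDbl l (pvLvl s0 ls) := by
  simp [pvLvl, List.foldl_append]

-- rebuilding every word from its choice vector yields exactly the level list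
lemma pvBuild (s0 : String) (ts : List Char) :
    ∀ (m : Nat), m ≤ ts.length →
      (pvChs m).map (pvBuildF s0 ts) = pvLvl s0 (ts.take m) := by
  intro m
  induction m with
  | zero => simp [pvChs, pvLvl, pvBuildF]
  | succ k ih =>
    intro h
    have hk : k < ts.length := by omega
    simp only [pvChs, List.map_flatMap, List.map_cons, List.map_nil]
    have step : ∀ c ∈ pvChs k,
        [pvBuildF s0 ts (c ++ [(0 : Int)]), pvBuildF s0 ts (c ++ [(1 : Int)])]
        = [pvBuildF s0 ts c ++ String.ofList [ts[k]], String.ofList [ts[k]] ++ pvBuildF s0 ts c] := by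
      intro c hc
      have hlen : c.length = k := pvChs_len k c hc
      have hz0 := pvZip_snoc c (0 : Int) ts (by omega)
      have hz1 := pvZip_snoc c (1 : Int) ts (by omega)
      unfold pvBuildF
      simp only [hz0, hz1, List.foldl_append, hlen]
      simp
    rw [List.flatMap_congr step]
    have : ts.take (k + 1) = ts.take k ++ [ts[k]] := by
      rw [List.take_add_one]
      simp [List.getElem?_eq_getElem hk]
    rw [this, pvLvl_snoc, ← ih (by omega)]
    simp only [pvDbl, List.flatMap_map]

lemma pvAssemble (zs : List (Int × Char)) : ∀ (l r : List Char) (s0 : String),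
    String.ofList (zs.foldl
        (fun (fb : List Char × List Char) bl =>
          if bl.1 = 0 then (fb.1, fb.2 ++ [bl.2]) else (fb.1 ++ [bl.2], fb.2))
        (l, r)).1.reverse ++ s0
      ++ String.ofList (zs.foldl
        (fun (fb : List Char × List Char) bl =>
          if bl.1 = 0 then (fb.1, fb.2 ++ [bl.2]) else (fb.1 ++ [bl.2], fb.2))
        (l, r)).2
    = zs.foldl (fun s bl => if bl.1 = 0 then s ++ String.ofList [bl.2] else String.ofList [bl.2] ++ s)
        (String.ofList l.reverse ++ s0 ++ String.ofList r) := by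
  induction zs with
  | nil => intro l r s0; rfl
  | cons bl zs ih =>
    intro l r s0
    simp only [List.foldl_cons]
    by_cases hb : bl.1 = 0
    · rw [if_pos hb, if_pos hb, ih l (r ++ [bl.2]) s0]
      rw [String.ofList_append]
      congr 1
      simp [String.append_assoc]
    · rw [if_neg hb, if_neg hb, ih (l ++ [bl.2]) r s0]
      rw [List.reverse_append, List.reverse_singleton, List.singleton_append,
        show String.ofList (bl.2 :: l.reverse) = String.ofList [bl.2] ++ String.ofList l.reverse
          from String.ofList_append (l₁ := [bl.2])]
      congr 1
      simp [String.append_assoc]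

lemma pvBuildG_eq (s0 : String) (ts : List Char) (c : List Int) :
    String.ofList ((c.zip ts).foldl
        (fun (fb : List Char × List Char) bl =>
          if bl.1 = 0 then (fb.1, fb.2 ++ [bl.2]) else (fb.1 ++ [bl.2], fb.2))
        ([], [])).1.reverse ++ s0
      ++ String.ofList ((c.zip ts).foldl
        (fun (fb : List Char × List Char) bl =>
          if bl.1 = 0 then (fb.1, fb.2 ++ [bl.2]) else (fb.1 ++ [bl.2], fb.2))
        ([], [])).2
    = pvBuildF s0 ts c := by
  rw [pvAssemble (c.zip ts) [] [] s0]
  unfold pvBuildF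
  congr 1
  show "" ++ s0 ++ "" = s0
  simp

lemma pvChsFold (m : Nat) :
    (PySem.List.pyRange 0 (m : Int)).foldl
        (fun (cs : List (List Int)) _ => cs.flatMap (fun c => [c ++ [(0 : Int)], c ++ [(1 : Int)]]))
        [[]]
      = pvChs m := by
  induction m with
  | zero => decide
  | succ k ih =>
    have : ((k + 1 : Nat) : Int) = (k : Int) + 1 := by push_cast; ring
    rw [this, PySem.List.pyRange_one_succ_right (by omega), List.foldl_append]
    rw [ih]
    rfl

lemma pvChr_nat (word : String) (k : Nat) (h : k < word.toList.length) :
    pvChr word (k : Int) = String.ofList [word.toList[k]] := by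
  unfold pvChr
  rw [PySem.Str.pyGet?_natCast, List.getElem?_eq_getElem h]
  rfl

lemma pvSliceTail (s : String) : (PySem.Str.slice s (some 1) none).toList = s.toList.drop 1 := by
  simp only [PySem.Str.toList_slice, PySem.Chars.slice_eq_listSlice, zero_le_one,
    PySem.List.slice_from, Int.toNat_one, List.drop_one]

lemma pvWAux_succ (word : String) (k : Nat) :
    pvWAux word (k + 1) = pvWAux word k ++ pvLvl (pvChr word 0) ((word.toList.drop 1).take (k + 1)) := by
  unfold pvWAux
  rw [List.range_succ]
  simp

-- A's loop: the whiteboard after k letters is pvWAux, the current level is pvLvl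
lemma pvA_aux (word : String) : ∀ (k : Nat), k ≤ word.toList.length - 1 →
    (PySem.List.pyRange 1 (1 + (k : Int))).foldl
        (fun (st : List String × List String) i =>
          ((combine st.2 (pvChr word i)).foldl (fun wb each => wb ++ [each]) st.1,
            combine st.2 (pvChr word i)))
        ([], [pvChr word 0])
      = (pvWAux word k, pvLvl (pvChr word 0) ((word.toList.drop 1).take k)) := by
  intro k
  induction k with
  | zero =>
    intro _
    have : (1 + ((0 : Nat) : Int)) = 1 := by norm_num
    rw [this, show PySem.List.pyRange 1 1 = [] from by decide]
    simp [pvWAux, pvLvl]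
  | succ k ih =>
    intro h
    have hlen : k + 1 < word.toList.length := by omega
    have e : (1 + ((k + 1 : Nat) : Int)) = (1 + (k : Int)) + 1 := by push_cast; ring
    rw [e, PySem.List.pyRange_one_succ_right (by omega), List.foldl_append, ih (by omega)]
    simp only [List.foldl_cons, List.foldl_nil]
    have hc : pvChr word (1 + (k : Int)) = String.ofList [word.toList[k + 1]] := by
      have : (1 + (k : Int)) = ((k + 1 : Nat) : Int) := by push_cast; ring
      rw [this, pvChr_nat word (k + 1) hlen]
    rw [hc, pvCombine_eq]
    have htake : (word.toList.drop 1).take (k + 1)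
        = (word.toList.drop 1).take k ++ [word.toList[k + 1]] := by
      rw [List.take_add_one]
      have hk' : k < (word.toList.drop 1).length := by rw [List.length_drop]; omega
      rw [List.getElem?_eq_getElem hk']
      simp
    rw [htake, pvLvl_snoc, PySem.List.foldl_append_singleton_eq_self, pvWAux_succ, htake, pvLvl_snoc]

-- B's loop: after k lengths the output list is the same pvWAux
lemma pvB_aux (word : String) : ∀ (k : Nat), k ≤ word.toList.length - 1 →
    (PySem.List.pyRange 2 (2 + (k : Int))).foldl
        (fun out L =>
          (((PySem.List.pyRange 0 (L - 1)).foldl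
              (fun (cs : List (List Int)) _ => cs.flatMap (fun c => [c ++ [(0 : Int)], c ++ [(1 : Int)]]))
              [[]]).foldl
            (fun out c =>
              out ++ [String.ofList ((c.zip (PySem.Str.slice word (some 1) none).toList).foldl
                  (fun (fb : List Char × List Char) bl =>
                    if bl.1 = 0 then (fb.1, fb.2 ++ [bl.2]) else (fb.1 ++ [bl.2], fb.2))
                  ([], [])).1.reverse ++ pvChr word 0
                ++ String.ofList ((c.zip (PySem.Str.slice word (some 1) none).toList).foldl
                  (fun (fb : List Char × List Char) bl =>
                    if bl.1 = 0 then (fb.1, fb.2 ++ [bl.2]) else (fb.1 ++ [bl.2], fb.2))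
                  ([], [])).2])
            out))
        []
      = pvWAux word k := by
  intro k
  induction k with
  | zero =>
    intro _
    have : (2 + ((0 : Nat) : Int)) = 2 := by norm_num
    rw [this, show PySem.List.pyRange 2 2 = [] from by decide]
    simp [pvWAux]
  | succ k ih =>
    intro h
    have e : (2 + ((k + 1 : Nat) : Int)) = (2 + (k : Int)) + 1 := by push_cast; ring
    rw [e, PySem.List.pyRange_one_succ_right (by omega), List.foldl_append, ih (by omega)]
    simp only [List.foldl_cons, List.foldl_nil]
    have e2 : (2 + (k : Int)) - 1 = ((k + 1 : Nat) : Int) := by push_cast; ring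
    rw [e2, pvChsFold (k + 1)]
    rw [show (fun (out : List String) c =>
          out ++ [String.ofList ((List.zip c (PySem.Str.slice word (some 1) none).toList).foldl
              (fun (fb : List Char × List Char) bl =>
                if bl.1 = 0 then (fb.1, fb.2 ++ [bl.2]) else (fb.1 ++ [bl.2], fb.2))
              ([], [])).1.reverse ++ pvChr word 0
            ++ String.ofList ((List.zip c (PySem.Str.slice word (some 1) none).toList).foldl
              (fun (fb : List Char × List Char) bl =>
                if bl.1 = 0 then (fb.1, fb.2 ++ [bl.2]) else (fb.1 ++ [bl.2], fb.2))
              ([], [])).2])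
        = fun (out : List String) c => out ++ [pvBuildF (pvChr word 0) (word.toList.drop 1) c] from by
      funext out c
      rw [pvSliceTail, pvBuildG_eq]]
    rw [PySem.List.foldl_append_singleton_eq_map (pvBuildF (pvChr word 0) (word.toList.drop 1)) (pvChs (k + 1))]
    rw [pvBuild (pvChr word 0) (word.toList.drop 1) (k + 1) (by rw [List.length_drop]; omega)]
    rw [pvWAux_succ]

-- ===== VERDICT (by name: the statement is the Claim_ definition above) =====
theorem win_last_word_spec : Claim_equal_win_last_word := by
  intro word _ hpre
  unfold Spec_win_last_word
  by_cases h1 : PySem.Str.len word = 1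
  · unfold win_last_word win_last_word_alt
    rw [if_pos h1, if_pos h1]
  · have hlen : 2 ≤ word.toList.length := by
      have h0 : word.toList ≠ [] := by
        intro hc
        exact hpre (by cases word with | _ d => cases d with | _ l => simpa using congrArg String.ofList hc)
      have h1' : word.toList.length ≠ 1 := by
        intro hc
        exact h1 (by rw [PySem.Str.len_eq, hc]; rfl)
      have := List.length_pos_iff.2 h0
      omega
    simp only [win_last_word, win_last_word_alt, if_neg h1]
    have e1 : PySem.List.pyRange 1 (PySem.Str.len word)
        = PySem.List.pyRange 1 (1 + ((word.toList.length - 1 : Nat) : Int)) := by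
      rw [PySem.Str.len_eq]; congr 1; omega
    have e2 : PySem.List.pyRange 2 (PySem.Str.len word + 1)
        = PySem.List.pyRange 2 (2 + ((word.toList.length - 1 : Nat) : Int)) := by
      rw [PySem.Str.len_eq]; congr 1; omega
    rw [e1, pvA_aux word _ le_rfl, e2, pvB_aux word _ le_rfl]
    exact pvTwoSorts _
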